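-- pv_equiv track=rewrite | github.com/ameliahardy/124-pa7-transcripts | grading-for-167976157/chatbot.py | affirmative
-- ===== SOURCE A (Python) =====
-- def affirmative(text):
-- 	aff = ["yes", "yeah", "ye", "y", "yup", "sure", "ok", "okay", "alright", "absolutely", "of course", "definitely", "you bet", "please", "yes please"]
-- 	words = text.lower().split()
-- 	appears = False
-- 	for word in words:
-- 		if word in aff:
-- 			appears = True
-- 	return appears
-- ===== SOURCE B (Python) =====
-- _AFF = frozenset(["yes", "yeah", "ye", "y", "yup", "sure", "ok", "okay", "alright", "absolutely", "of course", "definitely", "you bet", "please", "yes please"])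
--
-- def affirmative(text):
-- 	# Single character-level pass: build the current word while scanning the
-- 	# lowered text, test it at each whitespace boundary, early-return on a hit.
-- 	cur = ""
-- 	for ch in text.lower():
-- 		if ch.isspace():
-- 			if cur in _AFF:
-- 				return True
-- 			cur = ""
-- 		else:
-- 			cur += ch
-- 	return cur in _AFF
-- ===== Notes on version B (the rewrite author's own statement) =====
-- stated objective: alternative
-- what changed: A splits the text into a word list and runs a flag-setting loop over all words; B never splits: it streams over the lowered characters once, building the current word incrementally and testing it at each whitespace boundary with an early return.
import Mathlib
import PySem

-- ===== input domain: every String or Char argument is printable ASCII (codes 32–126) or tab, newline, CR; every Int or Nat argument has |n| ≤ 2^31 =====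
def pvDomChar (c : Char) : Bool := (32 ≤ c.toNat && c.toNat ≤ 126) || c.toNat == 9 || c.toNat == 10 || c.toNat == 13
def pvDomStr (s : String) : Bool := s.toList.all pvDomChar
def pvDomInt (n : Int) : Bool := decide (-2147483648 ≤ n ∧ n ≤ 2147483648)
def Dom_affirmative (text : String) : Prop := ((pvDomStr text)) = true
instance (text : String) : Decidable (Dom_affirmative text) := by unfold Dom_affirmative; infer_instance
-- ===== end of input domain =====

-- B replaces A's split-then-flag-loop with a single character-level scan that builds each word
-- on the fly and tests it at every whitespace boundary with an early return (alternative decomposition).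

-- ===== PORT A =====
def affAList : List String := ["yes", "yeah", "ye", "y", "yup", "sure", "ok", "okay", "alright", "absolutely", "of course", "definitely", "you bet", "please", "yes please"]

def affirmative (text : String) : Bool :=
  let words := PySem.Str.split₀ (PySem.Str.lower text)
  words.foldl (fun appears word => if affAList.contains word then true else appears) false

-- ===== PORT B =====
def affWords : List (List Char) := ["yes".toList, "yeah".toList, "ye".toList, "y".toList, "yup".toList, "sure".toList, "ok".toList, "okay".toList, "alright".toList, "absolutely".toList, "of course".toList, "definitely".toList, "you bet".toList, "please".toList, "yes please".toList]

-- the for-loop of Source B as structural recursion over the lowered characters, state = current word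
def affScan : List Char → List Char → Bool
  | [], cur => affWords.contains cur
  | c :: rest, cur =>
    if PySem.Chars.isspace c then
      if affWords.contains cur then true else affScan rest []
    else affScan rest (cur ++ [c])

def affirmative_alt (text : String) : Bool :=
  affScan (PySem.Chars.lower text.toList) []

-- ===== PRECONDITION & SPEC =====
def Spec_affirmative (text : String) (out : Bool) : Prop := out = affirmative_alt text
instance (text : String) (out : Bool) : Decidable (Spec_affirmative text out) := by unfold Spec_affirmative; infer_instance

-- ===== CLAIM (what is proved, stated in full; the proofs are below) =====
def Claim_equal_affirmative : Prop := ∀ (text : String), Dom_affirmative text → Spec_affirmative text (affirmative text)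

-- ===== LEMMAS AND PROOFS =====
theorem affA_eq_any (ws : List String) :
    ws.foldl (fun appears word => if affAList.contains word then true else appears) false
      = ws.any (fun w => affAList.contains w) := by
  simpa using PySem.List.foldl_if_true_eq (l := ws) (p := fun w => affAList.contains w) (b := false)

theorem affAList_eq_map : affAList = affWords.map String.ofList := by decide

theorem contains_map_ofList (L : List (List Char)) (w : List Char) :
    (L.map String.ofList).contains (String.ofList w) = L.contains w := by
  induction L with
  | nil => rfl
  | cons a t ih =>
    simp only [List.map_cons, List.contains_cons, ih]
    have : (String.ofList w == String.ofList a) = (w == a) := by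
      rw [Bool.eq_iff_iff, beq_iff_eq, beq_iff_eq]
      exact ⟨fun h => by simpa using congrArg String.toList h, fun h => by rw [h]⟩
    rw [this]

theorem go_append (cs : List Char) : ∀ (cur : List Char) (acc : List (List Char)),
    PySem.Chars.split₀.go cs cur acc = acc.reverse ++ PySem.Chars.split₀.go cs cur [] := by
  induction cs with
  | nil =>
    intro cur acc
    simp only [PySem.Chars.split₀.go]
    by_cases h : cur.isEmpty <;> simp [h]
  | cons c rest ih =>
    intro cur acc
    simp only [PySem.Chars.split₀.go]
    by_cases hs : PySem.Chars.isspace c <;> by_cases h : cur.isEmpty <;>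
      simp [hs, h, ih [] acc, ih [] [cur.reverse], ih [] (cur.reverse :: acc), ih (c :: cur) acc]

theorem affScan_eq_any (cs : List Char) : ∀ (cur : List Char),
    affScan cs cur
      = (PySem.Chars.split₀.go cs cur.reverse []).any (fun w => affWords.contains w) := by
  induction cs with
  | nil =>
    intro cur
    simp only [affScan, PySem.Chars.split₀.go]
    by_cases h : cur = []
    · subst h; decide
    · have : (cur.reverse.isEmpty) = false := by simp [h]
      simp [this]
  | cons c rest ih =>
    intro cur
    simp only [affScan, PySem.Chars.split₀.go]
    by_cases hs : PySem.Chars.isspace c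
    · by_cases h : cur = []
      · subst h
        simpa [hs] using ih []
      · have he : (cur.reverse.isEmpty) = false := by simp [h]
        simp [hs, he, go_append rest [] [cur], ih []]
    · rw [if_neg hs, if_neg hs, ih (cur ++ [c])]
      simp

-- ===== VERDICT (by name: the statement is the Claim_ definition above) =====
theorem affirmative_spec : Claim_equal_affirmative := by
  intro text _
  unfold Spec_affirmative affirmative affirmative_alt
  rw [affA_eq_any, affScan_eq_any]
  have hsplit : PySem.Str.split₀ (PySem.Str.lower text)
      = (PySem.Chars.split₀ (PySem.Chars.lower text.toList)).map String.ofList := by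
    simp [PySem.Str.split₀]
  rw [hsplit, PySem.Chars.split₀, List.any_map]
  simp only [Function.comp_def, affAList_eq_map, contains_map_ofList, List.reverse_nil]
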